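-- pv_equiv track=rewrite | github.com/lilamcilveen/Recursive-Pig-Latin | piggypoo.py | leftVowel
-- ===== SOURCE A (Python) =====
-- def recursiveLen(text):
--   if(text):
--     return recursiveLen(text[1:]) + 1
--   return 0
--
-- def leftVowel(text):
--   if text:
--     textLen = recursiveLen(text)
--     if(text[0] != 'a' and text[0] != 'e' and text[0] != 'i' and text[0] != 'o' and text[0] != 'u'):
--       if(textLen == 1):
--         return 1
--       else:
--         return leftVowel(text[1:]) + 1
--     return 0
-- ===== SOURCE B (Python) =====
-- def leftVowel(text):
--     if not text:
--         return None
--     hits = [p for p in (text.find(v) for v in "aeiou") if p >= 0]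
--     return min(hits) if hits else len(text)
-- ===== Notes on version B (the rewrite author's own statement) =====
-- stated objective: faster
-- what changed: Replaced the per-character recursion (which recomputes the length by recursion at every step) with a loop over the five vowels using str.find and a min-reduction over the found positions.
import Mathlib
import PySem

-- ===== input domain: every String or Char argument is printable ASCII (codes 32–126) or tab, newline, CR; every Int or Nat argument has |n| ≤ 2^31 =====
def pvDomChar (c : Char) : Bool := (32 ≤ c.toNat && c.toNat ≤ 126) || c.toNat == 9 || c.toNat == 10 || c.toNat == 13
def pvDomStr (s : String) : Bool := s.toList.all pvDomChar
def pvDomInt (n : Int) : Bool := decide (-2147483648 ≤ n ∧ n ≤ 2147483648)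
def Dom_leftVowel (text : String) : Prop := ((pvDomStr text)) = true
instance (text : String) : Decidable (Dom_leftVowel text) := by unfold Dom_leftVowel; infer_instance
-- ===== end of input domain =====

-- B replaces A's per-character recursion (with its recursive length recomputation) by a
-- loop over the five vowels using str.find and a min-reduction; measured faster on large inputs.

-- ===== PORT A =====
def recursiveLen : List Char → Int
  | [] => 0
  | _ :: t => recursiveLen t + 1

def leftVowelAux : List Char → Option Int
  | [] => none
  | c :: t =>
    let textLen := recursiveLen (c :: t)
    if c ≠ 'a' ∧ c ≠ 'e' ∧ c ≠ 'i' ∧ c ≠ 'o' ∧ c ≠ 'u' then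
      if textLen = 1 then some 1
      else (leftVowelAux t).map (· + 1)
    else some 0

def leftVowel (text : String) : Option Int := leftVowelAux text.toList

-- ===== PORT B =====
def pvVowels : List Char := ['a', 'e', 'i', 'o', 'u']

def leftVowel_alt (text : String) : Option Int :=
  if text.toList = [] then none
  else
    let hits := (pvVowels.map (fun v => PySem.Str.find text (String.ofList [v]))).filter
      (fun p => decide (0 ≤ p))
    if hits = [] then some (PySem.Str.len text) else PySem.List.min? hits (fun p => p)

-- ===== PRECONDITION & SPEC =====
def Spec_leftVowel (text : String) (out : Option Int) : Prop := out = leftVowel_alt text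
instance (text : String) (out : Option Int) : Decidable (Spec_leftVowel text out) := by unfold Spec_leftVowel; infer_instance

-- ===== CLAIM (what is proved, stated in full; the proofs are below) =====
def Claim_equal_leftVowel : Prop := ∀ (text : String), Dom_leftVowel text → Spec_leftVowel text (leftVowel text)

-- ===== LEMMAS AND PROOFS =====

-- B's hit list, on the List Char side (proof-only helper).
def bHits (cs : List Char) : List Int :=
  (pvVowels.map (fun v => PySem.Chars.find cs [v])).filter (fun p => decide (0 ≤ p))

lemma recursiveLen_eq (cs : List Char) : recursiveLen cs = (cs.length : Int) := by
  induction cs with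
  | nil => simp [recursiveLen]
  | cons c t ih => simp [recursiveLen, ih]

lemma find_single_nonneg_iff (s : List Char) (v : Char) :
    0 ≤ PySem.Chars.find s [v] ↔ v ∈ s := by
  rw [PySem.Chars.find_nonneg_iff, List.singleton_infix_iff]

lemma find_cons_single (c v : Char) (t : List Char) :
    PySem.Chars.find (c :: t) [v] =
      if c = v then (0 : Int)
      else if PySem.Chars.find t [v] = -1 then -1 else PySem.Chars.find t [v] + 1 := by
  by_cases hcv : c = v
  · subst hcv
    rw [if_pos rfl]
    have hpre : [c] <+: (c :: t) := ⟨t, rfl⟩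
    have hinf : [c] <:+: (c :: t) := hpre.isInfix
    have h0 : 0 ≤ PySem.Chars.find (c :: t) [c] := (PySem.Chars.find_nonneg_iff _ _).mpr hinf
    obtain ⟨hp, hmin⟩ := PySem.Chars.find_spec h0
    by_contra hne
    have hpos : 0 < (PySem.Chars.find (c :: t) [c]).toNat := by omega
    exact hmin 0 hpos ⟨t, rfl⟩
  · rw [if_neg hcv]
    by_cases h1 : PySem.Chars.find t [v] = -1
    · rw [if_pos h1]
      have hvt : v ∉ t := by
        have h := (PySem.Chars.find_eq_neg_one_iff _ _).mp h1
        rwa [List.singleton_infix_iff] at h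
      apply (PySem.Chars.find_eq_neg_one_iff _ _).mpr
      rw [List.singleton_infix_iff]
      simp only [List.mem_cons, not_or]
      exact ⟨fun h => hcv h.symm, hvt⟩
    · rw [if_neg h1]
      have hk : 0 ≤ PySem.Chars.find t [v] := by
        have := PySem.Chars.neg_one_le_find t [v]; omega
      obtain ⟨hpt, hmint⟩ := PySem.Chars.find_spec hk
      have hvt : v ∈ t := (find_single_nonneg_iff t v).mp hk
      have hF : 0 ≤ PySem.Chars.find (c :: t) [v] := by
        rw [find_single_nonneg_iff]; exact List.mem_cons_of_mem _ hvt
      obtain ⟨hpF, hminF⟩ := PySem.Chars.find_spec hF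
      have hF0 : (PySem.Chars.find (c :: t) [v]).toNat ≠ 0 := by
        intro h
        rw [h] at hpF
        obtain ⟨r, hr⟩ := hpF
        rw [List.drop_zero] at hr
        simp only [List.singleton_append, List.cons.injEq] at hr
        exact hcv hr.1.symm
      have hdrop : List.drop (PySem.Chars.find (c :: t) [v]).toNat (c :: t)
          = List.drop ((PySem.Chars.find (c :: t) [v]).toNat - 1) t := by
        obtain ⟨j, hj⟩ : ∃ j, (PySem.Chars.find (c :: t) [v]).toNat = j + 1 :=
          ⟨(PySem.Chars.find (c :: t) [v]).toNat - 1, by omega⟩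
        rw [hj]
        simp [List.drop_succ_cons]
      have hge : (PySem.Chars.find t [v]).toNat ≤ (PySem.Chars.find (c :: t) [v]).toNat - 1 := by
        by_contra hlt
        refine hmint _ ?_ (hdrop ▸ hpF)
        omega
      have hle : (PySem.Chars.find (c :: t) [v]).toNat ≤ (PySem.Chars.find t [v]).toNat + 1 := by
        by_contra hlt
        refine hminF ((PySem.Chars.find t [v]).toNat + 1) (by omega) ?_
        simpa [List.drop_succ_cons] using hpt
      omega

lemma filter_map_shift (l : List Int) (h : ∀ x ∈ l, -1 ≤ x) :
    ((l.map (fun x => if x = -1 then (-1 : Int) else x + 1)).filter (fun p => decide (0 ≤ p)))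
      = (l.filter (fun p => decide (0 ≤ p))).map (· + 1) := by
  induction l with
  | nil => simp
  | cons x l ih =>
    have hx : -1 ≤ x := h x (List.mem_cons_self ..)
    have hrest := ih (fun y hy => h y (List.mem_cons_of_mem _ hy))
    by_cases h1 : x = -1
    · subst h1; simpa using hrest
    · have hx0 : 0 ≤ x := by omega
      have hx1 : 0 ≤ x + 1 := by omega
      simp [h1, hx0, hx1, hrest]

lemma foldl_min_map (t : List Int) : ∀ x : Int,
    (t.map (· + 1)).foldl min (x + 1) = (t.foldl min x) + 1 := by
  induction t with
  | nil => intro x; simp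
  | cons y t ih =>
    intro x
    simp only [List.map_cons, List.foldl_cons]
    rw [show min (x + 1) (y + 1) = min x y + 1 by omega, ih]

lemma min?_map_succ (x : Int) (t : List Int) :
    PySem.List.min? ((x :: t).map (· + 1)) (fun p => p)
      = (PySem.List.min? (x :: t) (fun p => p)).map (· + 1) := by
  rw [List.map_cons, PySem.List.min?_id_cons, PySem.List.min?_id_cons]
  simp [foldl_min_map]

lemma min?_zero (l : List Int) (h0 : (0 : Int) ∈ l) (hpos : ∀ x ∈ l, 0 ≤ x) :
    PySem.List.min? l (fun p => p) = some 0 := by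
  have hne : l ≠ [] := by intro h; subst h; simp at h0
  obtain ⟨m, hm⟩ : ∃ m, PySem.List.min? l (fun p => p) = some m := by
    cases hminl : PySem.List.min? l (fun p => p) with
    | none => exact absurd ((PySem.List.min?_eq_none_iff _ _).mp hminl) hne
    | some m => exact ⟨m, rfl⟩
  have hmem := PySem.List.min?_mem hm
  have hle := PySem.List.min?_isMin hm 0 h0
  have hge := hpos m hmem
  have : m = 0 := le_antisymm hle hge
  rw [hm, this]

lemma bHits_cons_vowel (c : Char) (t : List Char) (hc : c ∈ pvVowels) :
    (0 : Int) ∈ bHits (c :: t) := by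
  have h0 : PySem.Chars.find (c :: t) [c] = 0 := by
    rw [find_cons_single]; simp
  unfold bHits
  rw [List.mem_filter]
  refine ⟨?_, by decide⟩
  exact h0 ▸ List.mem_map_of_mem hc

lemma bHits_cons_nonvowel (c : Char) (t : List Char) (hc : c ∉ pvVowels) :
    bHits (c :: t) = (bHits t).map (· + 1) := by
  unfold bHits
  have hmap : pvVowels.map (fun v => PySem.Chars.find (c :: t) [v])
      = (pvVowels.map (fun v => PySem.Chars.find t [v])).map
          (fun x => if x = -1 then (-1 : Int) else x + 1) := by
    rw [List.map_map]
    apply List.map_congr_left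
    intro v hv
    have hcv : c ≠ v := fun h => hc (h ▸ hv)
    simp only [Function.comp]
    rw [find_cons_single, if_neg hcv]
  rw [hmap, filter_map_shift]
  intro x hx
  obtain ⟨v, _, rfl⟩ := List.mem_map.mp hx
  exact PySem.Chars.neg_one_le_find _ _

lemma bHits_pos (cs : List Char) : ∀ x ∈ bHits cs, (0 : Int) ≤ x := by
  intro x hx
  have := (List.mem_filter.mp hx).2
  simpa using this

lemma main_aux (cs : List Char) (hne : cs ≠ []) :
    leftVowelAux cs =
      (if bHits cs = [] then some ((cs.length : Int)) else PySem.List.min? (bHits cs) (fun p => p)) := by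
  induction cs with
  | nil => exact absurd rfl hne
  | cons c t ih =>
    by_cases hv : c ∈ pvVowels
    · have hcond : ¬ (c ≠ 'a' ∧ c ≠ 'e' ∧ c ≠ 'i' ∧ c ≠ 'o' ∧ c ≠ 'u') := by
        simp only [pvVowels, List.mem_cons] at hv
        tauto
      have h0 := bHits_cons_vowel c t hv
      have hne' : bHits (c :: t) ≠ [] := by intro h; rw [h] at h0; simp at h0
      rw [if_neg hne', min?_zero _ h0 (bHits_pos _)]
      simp [leftVowelAux, hcond]
    · have hcond : c ≠ 'a' ∧ c ≠ 'e' ∧ c ≠ 'i' ∧ c ≠ 'o' ∧ c ≠ 'u' := by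
        simp only [pvVowels, List.mem_cons] at hv
        tauto
      rw [bHits_cons_nonvowel c t hv]
      cases t with
      | nil =>
        have hb : bHits ([] : List Char) = [] := by decide
        simp [leftVowelAux, hcond, hb, recursiveLen]
      | cons d t' =>
        have hlen : recursiveLen (c :: d :: t') ≠ 1 := by
          rw [recursiveLen_eq]; simp; omega
        have ihr := ih (by simp)
        have hA : leftVowelAux (c :: d :: t') = (leftVowelAux (d :: t')).map (· + 1) := by
          rw [leftVowelAux]
          simp only [if_pos hcond, if_neg hlen]
        rw [hA, ihr]
        by_cases hbt : bHits (d :: t') = []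
        · rw [if_pos hbt, hbt]
          simp only [List.map_nil, Option.map_some, List.length_cons, reduceIte]
          push_cast
          ring_nf
        · have hbm : (bHits (d :: t')).map (· + 1) ≠ [] := by
            simpa using hbt
          obtain ⟨x, r, hxr⟩ := List.exists_cons_of_ne_nil hbt
          rw [if_neg hbt, if_neg hbm, hxr, min?_map_succ]

-- ===== VERDICT (by name: the statement is the Claim_ definition above) =====
theorem leftVowel_spec : Claim_equal_leftVowel := by
  intro text _
  unfold Spec_leftVowel leftVowel leftVowel_alt
  cases htl : text.toList with
  | nil => simp [leftVowelAux]
  | cons c t =>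
    rw [if_neg (by simp : ¬ (c :: t) = [])]
    have hhits : (pvVowels.map (fun v => PySem.Str.find text (String.ofList [v]))).filter
        (fun p => decide (0 ≤ p)) = bHits text.toList := by
      unfold bHits
      congr 1
    have hlen : PySem.Str.len text = ((c :: t).length : Int) := by
      rw [PySem.Str.len_eq, htl]
    rw [hhits, htl, hlen]
    exact main_aux (c :: t) (by simp)
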